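-- pv_equiv track=rewrite | github.com/b0931866529/bingo | calcu_539/algorithm/mark_old.py | ballToMark
-- ===== SOURCE A (Python) =====
-- def ballToMark(ball: str) -> str:
--     """
--     依照球號排序
--     """
--     if any(ball == n for n in ['31', '11']):
--         return '單一'
--     if any(ball == n for n in ['32', '12']):
--         return '單二'
--     if any(ball == n for n in ['33', '13']):
--         return '單三'
--     if any(ball == n for n in ['34', '14']):
--         return '單四'
--     if any(ball == n for n in ['35', '15']):
--         return '單五'
--
--     if any(ball == n for n in ['21', '01']):
--         return '雙一'
--     if any(ball == n for n in ['22', '02']):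
--         return '雙二'
--     if any(ball == n for n in ['23', '03']):
--         return '雙三'
--     if any(ball == n for n in ['24', '04']):
--         return '雙四'
--     if any(ball == n for n in ['25', '05']):
--         return '雙五'
--
--     if any(ball == n for n in ['36', '16']):
--         return '單六'
--     if any(ball == n for n in ['37', '17']):
--         return '單七'
--     if any(ball == n for n in ['38', '18']):
--         return '單八'
--     if any(ball == n for n in ['39', '19']):
--         return '單九'
--
--     if any(ball == n for n in ['26', '06']):
--         return '雙六'
--     if any(ball == n for n in ['27', '07']):
--         return '雙七'
--     if any(ball == n for n in ['28', '08']):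
--         return '雙八'
--     if any(ball == n for n in ['29', '09']):
--         return '雙九'
--
--     if any(ball == n for n in ['10', '20', '30']):
--         return '零'
--     return ''
-- ===== SOURCE B (Python) =====
-- _PREFIX = {'1': '單', '3': '單', '0': '雙', '2': '雙'}
-- _UNITS = {'1': '一', '2': '二', '3': '三', '4': '四', '5': '五',
--           '6': '六', '7': '七', '8': '八', '9': '九'}
--
-- def ballToMark(ball: str) -> str:
--     """
--     依照球號排序
--     """
--     if ball in ('10', '20', '30'):
--         return '零'
--     if len(ball) == 2:
--         p = _PREFIX.get(ball[0])
--         u = _UNITS.get(ball[1])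
--         if p is not None and u is not None:
--             return p + u
--     return ''
-- ===== Notes on version B (the rewrite author's own statement) =====
-- stated objective: simpler
-- what changed: B builds the label compositionally from the two digits (a parity-prefix map for the tens digit and a units map for the ones digit, with '10'/'20'/'30' handled as the one special case) instead of enumerating ~20 whole-string comparisons.
import Mathlib
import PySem

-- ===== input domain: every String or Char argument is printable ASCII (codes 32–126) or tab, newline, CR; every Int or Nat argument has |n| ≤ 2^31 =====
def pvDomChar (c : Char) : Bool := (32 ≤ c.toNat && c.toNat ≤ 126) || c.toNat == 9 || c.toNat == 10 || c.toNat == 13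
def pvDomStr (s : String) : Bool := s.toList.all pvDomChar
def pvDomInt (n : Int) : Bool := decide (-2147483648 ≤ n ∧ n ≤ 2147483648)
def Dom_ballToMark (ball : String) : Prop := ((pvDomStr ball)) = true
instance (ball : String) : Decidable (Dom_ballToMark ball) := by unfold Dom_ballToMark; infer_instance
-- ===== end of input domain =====

-- B computes the label compositionally from the two digits (parity prefix + units map) instead of A's ~20 whole-string comparisons; objective: simpler.

-- ===== PORT A =====
def ballToMark (ball : String) : String :=
  if (["31", "11"].any (fun n => ball == n)) then "單一"
  else if (["32", "12"].any (fun n => ball == n)) then "單二"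
  else if (["33", "13"].any (fun n => ball == n)) then "單三"
  else if (["34", "14"].any (fun n => ball == n)) then "單四"
  else if (["35", "15"].any (fun n => ball == n)) then "單五"
  else if (["21", "01"].any (fun n => ball == n)) then "雙一"
  else if (["22", "02"].any (fun n => ball == n)) then "雙二"
  else if (["23", "03"].any (fun n => ball == n)) then "雙三"
  else if (["24", "04"].any (fun n => ball == n)) then "雙四"
  else if (["25", "05"].any (fun n => ball == n)) then "雙五"
  else if (["36", "16"].any (fun n => ball == n)) then "單六"
  else if (["37", "17"].any (fun n => ball == n)) then "單七"
  else if (["38", "18"].any (fun n => ball == n)) then "單八"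
  else if (["39", "19"].any (fun n => ball == n)) then "單九"
  else if (["26", "06"].any (fun n => ball == n)) then "雙六"
  else if (["27", "07"].any (fun n => ball == n)) then "雙七"
  else if (["28", "08"].any (fun n => ball == n)) then "雙八"
  else if (["29", "09"].any (fun n => ball == n)) then "雙九"
  else if (["10", "20", "30"].any (fun n => ball == n)) then "零"
  else ""

-- ===== PORT B =====
-- B-side helpers: the two digit maps of Source B (module-level dicts)
def pvPrefixD : PySem.Dict Char String :=
  PySem.Dict.ofList [('1', "單"), ('3', "單"), ('0', "雙"), ('2', "雙")]

def pvUnitsD : PySem.Dict Char String :=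
  PySem.Dict.ofList [('1', "一"), ('2', "二"), ('3', "三"), ('4', "四"), ('5', "五"),
                     ('6', "六"), ('7', "七"), ('8', "八"), ('9', "九")]

def ballToMark_alt (ball : String) : String :=
  if ball == "10" || ball == "20" || ball == "30" then "零"
  else
    -- Source B's "len(ball) == 2" guard plus ball[0]/ball[1] indexing, as a two-character pattern (exact)
    match ball.toList with
    | [c0, c1] =>
      match pvPrefixD.get? c0, pvUnitsD.get? c1 with
      | some p, some u => p ++ u
      | _, _ => ""
    | _ => ""

-- ===== PRECONDITION & SPEC =====
def Spec_ballToMark (ball : String) (out : String) : Prop := out = ballToMark_alt ball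
instance (ball : String) (out : String) : Decidable (Spec_ballToMark ball out) := by unfold Spec_ballToMark; infer_instance

-- ===== CLAIM (what is proved, stated in full; the proofs are below) =====
def Claim_equal_ballToMark : Prop := ∀ (ball : String), Dom_ballToMark ball → Spec_ballToMark ball (ballToMark ball)

-- ===== LEMMAS AND PROOFS =====

-- String.ofList l = t, read at the character-list level
theorem pvStrEqIff (l : List Char) (t : String) : (String.ofList l = t) ↔ l = t.toList := by
  constructor
  · intro h; have h2 := congrArg String.toList h; simpa using h2
  · intro h; subst h; simp

theorem pvPrefixNone (a : Char) (h0 : ¬ a = '0') (h1 : ¬ a = '1') (h2 : ¬ a = '2') (h3 : ¬ a = '3') :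
    PySem.Dict.get? pvPrefixD a = none := by
  have e : pvPrefixD = PySem.Dict.mk [('1', "單"), ('3', "單"), ('0', "雙"), ('2', "雙")] := by decide
  rw [e]
  simp [PySem.Dict.get?_mk_cons, beq_iff_eq, Ne.symm h0, Ne.symm h1, Ne.symm h2, Ne.symm h3,
        show PySem.Dict.mk ([] : List (Char × String)) = PySem.Dict.empty from rfl,
        PySem.Dict.get?_empty]

theorem pvUnitsNone (b : Char) (h1 : ¬ b = '1') (h2 : ¬ b = '2') (h3 : ¬ b = '3') (h4 : ¬ b = '4')
    (h5 : ¬ b = '5') (h6 : ¬ b = '6') (h7 : ¬ b = '7') (h8 : ¬ b = '8') (h9 : ¬ b = '9') :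
    PySem.Dict.get? pvUnitsD b = none := by
  have e : pvUnitsD = PySem.Dict.mk [('1', "一"), ('2', "二"), ('3', "三"), ('4', "四"), ('5', "五"),
      ('6', "六"), ('7', "七"), ('8', "八"), ('9', "九")] := by decide
  rw [e]
  simp [PySem.Dict.get?_mk_cons, beq_iff_eq, Ne.symm h1, Ne.symm h2, Ne.symm h3, Ne.symm h4,
        Ne.symm h5, Ne.symm h6, Ne.symm h7, Ne.symm h8, Ne.symm h9,
        show PySem.Dict.mk ([] : List (Char × String)) = PySem.Dict.empty from rfl,
        PySem.Dict.get?_empty]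

theorem pvKey (l : List Char) : ballToMark (String.ofList l) = ballToMark_alt (String.ofList l) := by
  match l with
  | [] => decide
  | [a] =>
      simp [ballToMark, ballToMark_alt, pvStrEqIff, show ("31":String).toList = ['3','1'] from rfl, show ("11":String).toList = ['1','1'] from rfl, show ("32":String).toList = ['3','2'] from rfl, show ("12":String).toList = ['1','2'] from rfl, show ("33":String).toList = ['3','3'] from rfl, show ("13":String).toList = ['1','3'] from rfl, show ("34":String).toList = ['3','4'] from rfl, show ("14":String).toList = ['1','4'] from rfl, show ("35":String).toList = ['3','5'] from rfl, show ("15":String).toList = ['1','5'] from rfl, show ("21":String).toList = ['2','1'] from rfl, show ("01":String).toList = ['0','1'] from rfl, show ("22":String).toList = ['2','2'] from rfl, show ("02":String).toList = ['0','2'] from rfl, show ("23":String).toList = ['2','3'] from rfl, show ("03":String).toList = ['0','3'] from rfl, show ("24":String).toList = ['2','4'] from rfl, show ("04":String).toList = ['0','4'] from rfl, show ("25":String).toList = ['2','5'] from rfl, show ("05":String).toList = ['0','5'] from rfl, show ("36":String).toList = ['3','6'] from rfl, show ("16":String).toList = ['1','6'] from rfl, show ("37":String).toList = ['3','7'] from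 rfl, show ("17":String).toList = ['1','7'] from rfl, show ("38":String).toList = ['3','8'] from rfl, show ("18":String).toList = ['1','8'] from rfl, show ("39":String).toList = ['3','9'] from rfl, show ("19":String).toList = ['1','9'] from rfl, show ("26":String).toList = ['2','6'] from rfl, show ("06":String).toList = ['0','6'] from rfl, show ("27":String).toList = ['2','7'] from rfl, show ("07":String).toList = ['0','7'] from rfl, show ("28":String).toList = ['2','8'] from rfl, show ("08":String).toList = ['0','8'] from rfl, show ("29":String).toList = ['2','9'] from rfl, show ("09":String).toList = ['0','9'] from rfl, show ("10":String).toList = ['1','0'] from rfl, show ("20":String).toList = ['2','0'] from rfl, show ("30":String).toList = ['3','0'] from rfl]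
  | a :: b :: c :: r =>
      simp [ballToMark, ballToMark_alt, pvStrEqIff, show ("31":String).toList = ['3','1'] from rfl, show ("11":String).toList = ['1','1'] from rfl, show ("32":String).toList = ['3','2'] from rfl, show ("12":String).toList = ['1','2'] from rfl, show ("33":String).toList = ['3','3'] from rfl, show ("13":String).toList = ['1','3'] from rfl, show ("34":String).toList = ['3','4'] from rfl, show ("14":String).toList = ['1','4'] from rfl, show ("35":String).toList = ['3','5'] from rfl, show ("15":String).toList = ['1','5'] from rfl, show ("21":String).toList = ['2','1'] from rfl, show ("01":String).toList = ['0','1'] from rfl, show ("22":String).toList = ['2','2'] from rfl, show ("02":String).toList = ['0','2'] from rfl, show ("23":String).toList = ['2','3'] from rfl, show ("03":String).toList = ['0','3'] from rfl, show ("24":String).toList = ['2','4'] from rfl, show ("04":String).toList = ['0','4'] from rfl, show ("25":String).toList = ['2','5'] from rfl, show ("05":String).toList = ['0','5'] from rfl, show ("36":String).toList = ['3','6'] from rfl, show ("16":String).toList = ['1','6'] from rfl, show ("37":String).toList = ['3','7'] from rfl, show ("17":String).toList = ['1','7'] from rfl, show ("38":String).toList = ['3','8'] from rfl, show ("18":String).toList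 = ['1','8'] from rfl, show ("39":String).toList = ['3','9'] from rfl, show ("19":String).toList = ['1','9'] from rfl, show ("26":String).toList = ['2','6'] from rfl, show ("06":String).toList = ['0','6'] from rfl, show ("27":String).toList = ['2','7'] from rfl, show ("07":String).toList = ['0','7'] from rfl, show ("28":String).toList = ['2','8'] from rfl, show ("08":String).toList = ['0','8'] from rfl, show ("29":String).toList = ['2','9'] from rfl, show ("09":String).toList = ['0','9'] from rfl, show ("10":String).toList = ['1','0'] from rfl, show ("20":String).toList = ['2','0'] from rfl, show ("30":String).toList = ['3','0'] from rfl]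
  | [a, b] =>
      have ha : a = '0' ∨ a = '1' ∨ a = '2' ∨ a = '3' ∨
          (¬ a = '0' ∧ ¬ a = '1' ∧ ¬ a = '2' ∧ ¬ a = '3') := by tauto
      have hb : b = '0' ∨ b = '1' ∨ b = '2' ∨ b = '3' ∨ b = '4' ∨ b = '5' ∨ b = '6' ∨ b = '7' ∨
          b = '8' ∨ b = '9' ∨ (¬ b = '0' ∧ ¬ b = '1' ∧ ¬ b = '2' ∧ ¬ b = '3' ∧ ¬ b = '4' ∧
          ¬ b = '5' ∧ ¬ b = '6' ∧ ¬ b = '7' ∧ ¬ b = '8' ∧ ¬ b = '9') := by tauto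
      rcases ha with rfl | rfl | rfl | rfl | hA <;>
        rcases hb with rfl | rfl | rfl | rfl | rfl | rfl | rfl | rfl | rfl | rfl | hB <;>
        first
          | decide
          | simp_all [ballToMark, ballToMark_alt, pvStrEqIff, pvPrefixNone, pvUnitsNone,
              show ("31":String).toList = ['3','1'] from rfl, show ("11":String).toList = ['1','1'] from rfl, show ("32":String).toList = ['3','2'] from rfl, show ("12":String).toList = ['1','2'] from rfl, show ("33":String).toList = ['3','3'] from rfl, show ("13":String).toList = ['1','3'] from rfl, show ("34":String).toList = ['3','4'] from rfl, show ("14":String).toList = ['1','4'] from rfl, show ("35":String).toList = ['3','5'] from rfl, show ("15":String).toList = ['1','5'] from rfl, show ("21":String).toList = ['2','1'] from rfl, show ("01":String).toList = ['0','1'] from rfl, show ("22":String).toList = ['2','2'] from rfl, show ("02":String).toList = ['0','2'] from rfl, show ("23":String).toList = ['2','3'] from rfl, show ("03":String).toList = ['0','3'] from rfl, show ("24":String).toList = ['2','4'] from rfl, show ("04":String).toList = ['0','4'] from rfl, show ("25":String).toList = ['2','5'] from rfl, show ("05":String).toList = ['0','5'] from rfl, show ("36":String).toList = ['3','6'] from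 rfl, show ("16":String).toList = ['1','6'] from rfl, show ("37":String).toList = ['3','7'] from rfl, show ("17":String).toList = ['1','7'] from rfl, show ("38":String).toList = ['3','8'] from rfl, show ("18":String).toList = ['1','8'] from rfl, show ("39":String).toList = ['3','9'] from rfl, show ("19":String).toList = ['1','9'] from rfl, show ("26":String).toList = ['2','6'] from rfl, show ("06":String).toList = ['0','6'] from rfl, show ("27":String).toList = ['2','7'] from rfl, show ("07":String).toList = ['0','7'] from rfl, show ("28":String).toList = ['2','8'] from rfl, show ("08":String).toList = ['0','8'] from rfl, show ("29":String).toList = ['2','9'] from rfl, show ("09":String).toList = ['0','9'] from rfl, show ("10":String).toList = ['1','0'] from rfl, show ("20":String).toList = ['2','0'] from rfl, show ("30":String).toList = ['3','0'] from rfl, show pvPrefixD.get? '1' = some "單" from rfl, show pvPrefixD.get? '3' = some "單" from rfl, show pvPrefixD.get? '0' = some "雙" from rfl, show pvPrefixD.get? '2' = some "雙" from rfl, show pvUnitsD.get? '1' = some "一" from rfl, show pvUnitsD.get? '2' = some "二" from rfl, show pvUnitsD.get? '3' = some "三" from rfl, show pvUnitsD.get? '4' = some "四" from rfl, show pvUnitsD.get?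 '5' = some "五" from rfl, show pvUnitsD.get? '6' = some "六" from rfl, show pvUnitsD.get? '7' = some "七" from rfl, show pvUnitsD.get? '8' = some "八" from rfl, show pvUnitsD.get? '9' = some "九" from rfl]

theorem pvOfListToList (s : String) : String.ofList s.toList = s := by simp

-- ===== VERDICT (by name: the statement is the Claim_ definition above) =====
theorem ballToMark_spec : Claim_equal_ballToMark := by
  intro ball _
  unfold Spec_ballToMark
  have h := pvKey ball.toList
  rwa [pvOfListToList] at h
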